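-- pv_equiv track=rewrite | github.com/bltsai/ActivityLearning | ar_topic.py | indexOfPrefix
-- ===== SOURCE A (Python) =====
-- def indexOfPrefix(l, s):
--     max_candidate = ""
--     max_candidate_i = -1
--     for index, value in enumerate(l):
--         if value in s and len(value) > len(max_candidate):
--             max_candidate = value
--             max_candidate_i = index
--
--     return max_candidate_i
-- ===== SOURCE B (Python) =====
-- def indexOfPrefix(l, s):
--     for d in range(max(map(len, l), default=0), 0, -1):
--         for i, v in enumerate(l):
--             if len(v) == d and v in s:
--                 return i
--     return -1
-- ===== Notes on version B (the rewrite author's own statement) =====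
-- stated objective: alternative
-- what changed: Replaces A's single best-so-far accumulator scan by a length-descending search: iterate candidate lengths from max(map(len,l)) down to 1 and, for each length, rescan the list for the first element of exactly that length that is a substring of s, returning its index immediately; no running maximum is kept.
import Mathlib
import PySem

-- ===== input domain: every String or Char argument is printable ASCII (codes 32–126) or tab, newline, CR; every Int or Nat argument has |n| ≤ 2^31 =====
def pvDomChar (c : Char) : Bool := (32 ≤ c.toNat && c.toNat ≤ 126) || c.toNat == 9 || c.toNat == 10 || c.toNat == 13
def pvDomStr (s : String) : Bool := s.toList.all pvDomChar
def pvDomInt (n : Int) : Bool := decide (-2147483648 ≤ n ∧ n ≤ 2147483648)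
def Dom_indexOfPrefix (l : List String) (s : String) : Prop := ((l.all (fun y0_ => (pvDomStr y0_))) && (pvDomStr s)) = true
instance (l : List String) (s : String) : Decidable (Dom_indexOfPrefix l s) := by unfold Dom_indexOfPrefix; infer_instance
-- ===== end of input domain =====

-- B replaces A's best-so-far accumulator scan by a length-descending search with early return (objective: alternative).

-- ===== PORT A =====
-- the loop body of A: take (value, index) when value in s and len(value) > len(max_candidate)
def pvStepA (s : String) (st : String × Int) (iv : Int × String) : String × Int :=
  if PySem.Str.isIn iv.2 s && decide (PySem.Str.len st.1 < PySem.Str.len iv.2)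
  then (iv.2, iv.1) else st

def indexOfPrefix (l : List String) (s : String) : Int :=
  ((PySem.List.enumerate l 0).foldl (pvStepA s) ("", -1)).2

-- ===== PORT B =====
-- max(map(len, l), default=0)
def pvMaxLen (l : List String) : Int :=
  match PySem.List.max? (l.map PySem.Str.len) (fun x => x) with
  | none => 0
  | some m => m

-- the inner loop: first i with len(v) == d and v in s
def pvScanB (s : String) (d : Int) : List (Int × String) → Option Int
  | [] => none
  | p :: t =>
      if (PySem.Str.len p.2 == d) && PySem.Str.isIn p.2 s then some p.1 else pvScanB s d t

-- the outer loop over d in range(maxlen, 0, -1)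
def pvOuterB (l : List String) (s : String) : List Int → Int
  | [] => -1
  | d :: t =>
      match pvScanB s d (PySem.List.enumerate l 0) with
      | some i => i
      | none => pvOuterB l s t

def indexOfPrefix_alt (l : List String) (s : String) : Int :=
  pvOuterB l s (PySem.List.pyRange (pvMaxLen l) 0 (-1))

-- ===== PRECONDITION & SPEC =====
def Spec_indexOfPrefix (l : List String) (s : String) (out : Int) : Prop := out = indexOfPrefix_alt l s
instance (l : List String) (s : String) (out : Int) : Decidable (Spec_indexOfPrefix l s out) := by unfold Spec_indexOfPrefix; infer_instance

-- ===== CLAIM =====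
def Claim_equal_indexOfPrefix : Prop := ∀ (l : List String) (s : String), Dom_indexOfPrefix l s → Spec_indexOfPrefix l s (indexOfPrefix l s)

-- ===== LEMMAS AND PROOFS =====

-- characterization of A's fold: either the accumulator survives and bounds every candidate,
-- or the result is the first candidate of maximal length strictly above the accumulator
lemma foldA_char (s : String) :
    ∀ ps : List (Int × String), ps.Pairwise (fun a b => a.1 < b.1) →
    ∀ (c : String) (ci : Int),
      (ps.foldl (pvStepA s) (c, ci) = (c, ci)
        ∧ ∀ p ∈ ps, PySem.Str.isIn p.2 s = true → PySem.Str.len p.2 ≤ PySem.Str.len c)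
      ∨ (∃ p ∈ ps, ps.foldl (pvStepA s) (c, ci) = (p.2, p.1)
          ∧ PySem.Str.isIn p.2 s = true ∧ PySem.Str.len c < PySem.Str.len p.2
          ∧ (∀ q ∈ ps, PySem.Str.isIn q.2 s = true → PySem.Str.len q.2 ≤ PySem.Str.len p.2)
          ∧ (∀ q ∈ ps, PySem.Str.isIn q.2 s = true → PySem.Str.len q.2 = PySem.Str.len p.2 → p.1 ≤ q.1)) := by
  intro ps
  induction ps with
  | nil =>
      intro _ c ci
      exact Or.inl ⟨rfl, by simp⟩
  | cons p0 t ih =>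
      intro hpw c ci
      have hhead := (List.pairwise_cons.mp hpw).1
      have htail := (List.pairwise_cons.mp hpw).2
      by_cases hc : (PySem.Str.isIn p0.2 s && decide (PySem.Str.len c < PySem.Str.len p0.2)) = true
      · -- head is taken
        have hc2 := hc
        rw [Bool.and_eq_true] at hc2
        have hin0 : PySem.Str.isIn p0.2 s = true := hc2.1
        have hlt0 : PySem.Str.len c < PySem.Str.len p0.2 := of_decide_eq_true hc2.2
        have hstep : pvStepA s (c, ci) p0 = (p0.2, p0.1) := by
          unfold pvStepA; rw [if_pos hc]
        rcases ih htail p0.2 p0.1 with ⟨h1, h2⟩ | ⟨p, hp, hfold, hin, hlt, hbnd, hfst⟩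
        · refine Or.inr ⟨p0, List.mem_cons_self, ?_, hin0, hlt0, ?_, ?_⟩
          · rw [List.foldl_cons, hstep, h1]
          · intro q hq hqin
            rcases List.mem_cons.mp hq with rfl | hqt
            · exact le_refl _
            · exact h2 q hqt hqin
          · intro q hq _ _
            rcases List.mem_cons.mp hq with rfl | hqt
            · exact le_refl _
            · exact le_of_lt (hhead q hqt)
        · refine Or.inr ⟨p, List.mem_cons_of_mem _ hp, ?_, hin, lt_trans hlt0 hlt, ?_, ?_⟩
          · rw [List.foldl_cons, hstep, hfold]
          · intro q hq hqin
            rcases List.mem_cons.mp hq with rfl | hqt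
            · exact le_of_lt hlt
            · exact hbnd q hqt hqin
          · intro q hq hqin hqlen
            rcases List.mem_cons.mp hq with rfl | hqt
            · omega
            · exact hfst q hqt hqin hqlen
      · -- head is skipped
        have hstep : pvStepA s (c, ci) p0 = (c, ci) := by
          unfold pvStepA; rw [if_neg hc]
        have hskip : PySem.Str.isIn p0.2 s = true → PySem.Str.len p0.2 ≤ PySem.Str.len c := by
          intro hin0
          by_contra hgt
          exact hc (by rw [hin0, Bool.true_and]; exact decide_eq_true (by omega))
        rcases ih htail c ci with ⟨h1, h2⟩ | ⟨p, hp, hfold, hin, hlt, hbnd, hfst⟩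
        · refine Or.inl ⟨?_, ?_⟩
          · rw [List.foldl_cons, hstep, h1]
          · intro q hq hqin
            rcases List.mem_cons.mp hq with rfl | hqt
            · exact hskip hqin
            · exact h2 q hqt hqin
        · refine Or.inr ⟨p, List.mem_cons_of_mem _ hp, ?_, hin, hlt, ?_, ?_⟩
          · rw [List.foldl_cons, hstep, hfold]
          · intro q hq hqin
            rcases List.mem_cons.mp hq with rfl | hqt
            · have := hskip hqin; omega
            · exact hbnd q hqt hqin
          · intro q hq hqin hqlen
            rcases List.mem_cons.mp hq with rfl | hqt
            · have := hskip hqin; omega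
            · exact hfst q hqt hqin hqlen

lemma scan_none (s : String) (d : Int) :
    ∀ ps : List (Int × String),
      (∀ q ∈ ps, ¬(PySem.Str.isIn q.2 s = true ∧ PySem.Str.len q.2 = d)) →
      pvScanB s d ps = none := by
  intro ps h
  induction ps with
  | nil => rfl
  | cons p t ih =>
      have hp := h p (List.mem_cons_self)
      have hcond : ((PySem.Str.len p.2 == d) && PySem.Str.isIn p.2 s) = false := by
        cases hb : ((PySem.Str.len p.2 == d) && PySem.Str.isIn p.2 s) with
        | false => rfl
        | true =>
            rw [Bool.and_eq_true] at hb
            exact absurd ⟨hb.2, eq_of_beq hb.1⟩ hp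
      simp only [pvScanB, hcond, Bool.false_eq_true, if_false]
      exact ih (fun q hq => h q (List.mem_cons_of_mem _ hq))

lemma scan_some (s : String) (d : Int) :
    ∀ ps : List (Int × String), ps.Pairwise (fun a b => a.1 < b.1) →
    ∀ p ∈ ps, PySem.Str.isIn p.2 s = true → PySem.Str.len p.2 = d →
      (∀ q ∈ ps, PySem.Str.isIn q.2 s = true → PySem.Str.len q.2 = d → p.1 ≤ q.1) →
      pvScanB s d ps = some p.1 := by
  intro ps hpw p hp hin hlen hmin
  induction ps with
  | nil => cases hp
  | cons h0 t ih =>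
      by_cases hc : ((PySem.Str.len h0.2 == d) && PySem.Str.isIn h0.2 s) = true
      · -- head matches; minimality forces p = h0
        simp only [pvScanB, hc, if_true]
        have hh : PySem.Str.len h0.2 = d ∧ PySem.Str.isIn h0.2 s = true := by
          simpa using hc
        have hle : p.1 ≤ h0.1 := hmin h0 (List.mem_cons_self) hh.2 hh.1
        rcases List.mem_cons.mp hp with rfl | hpt
        · rfl
        · have : h0.1 < p.1 := (List.pairwise_cons.mp hpw).1 p hpt
          omega
      · simp only [pvScanB, hc]
        have hpt : p ∈ t := by
          rcases List.mem_cons.mp hp with rfl | hpt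
          · exact absurd (by rw [hlen]; simpa using hin) hc
          · exact hpt
        exact ih (List.pairwise_cons.mp hpw).2 hpt
          (fun q hq => hmin q (List.mem_cons_of_mem _ hq))

lemma outer_none (l : List String) (s : String) :
    ∀ n : Nat, (∀ d : Int, 1 ≤ d → pvScanB s d (PySem.List.enumerate l 0) = none) →
      pvOuterB l s (PySem.List.pyRange (n : Int) 0 (-1)) = -1 := by
  intro n h
  induction n with
  | zero => rfl
  | succ m ih =>
      have hpos : (0 : Int) < ((m + 1 : Nat) : Int) := by push_cast; omega
      rw [PySem.List.pyRange_neg_one_cons hpos]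
      have hd : ((m + 1 : Nat) : Int) - 1 = (m : Int) := by push_cast; omega
      rw [hd]
      have hnone := h ((m + 1 : Nat) : Int) (by push_cast; omega)
      rw [pvOuterB, hnone]
      exact ih

lemma outer_some (l : List String) (s : String) :
    ∀ n : Nat, ∀ (D i : Int), 1 ≤ D → D ≤ (n : Int) →
      (∀ d : Int, D < d → pvScanB s d (PySem.List.enumerate l 0) = none) →
      pvScanB s D (PySem.List.enumerate l 0) = some i →
      pvOuterB l s (PySem.List.pyRange (n : Int) 0 (-1)) = i := by
  intro n D i hD1 hDn habove hsome
  induction n with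
  | zero => omega
  | succ m ih =>
      have hpos : (0 : Int) < ((m + 1 : Nat) : Int) := by push_cast; omega
      rw [PySem.List.pyRange_neg_one_cons hpos]
      have hd : ((m + 1 : Nat) : Int) - 1 = (m : Int) := by push_cast; omega
      rw [hd]
      by_cases hDeq : D = ((m + 1 : Nat) : Int)
      · rw [pvOuterB, ← hDeq, hsome]
      · have hnone := habove ((m + 1 : Nat) : Int) (by push_cast at hDn ⊢; omega)
        rw [pvOuterB, hnone]
        exact ih (by push_cast at hDn ⊢; omega)

lemma maxLen_nonneg (l : List String) : 0 ≤ pvMaxLen l := by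
  unfold pvMaxLen
  cases h : PySem.List.max? (l.map PySem.Str.len) (fun x => x) with
  | none => simp
  | some m =>
      have hm := PySem.List.max?_mem h
      rcases List.mem_map.mp hm with ⟨v, _, rfl⟩
      simp [PySem.Str.len]

lemma len_le_maxLen (l : List String) : ∀ v ∈ l, PySem.Str.len v ≤ pvMaxLen l := by
  intro v hv
  unfold pvMaxLen
  cases h : PySem.List.max? (l.map PySem.Str.len) (fun x => x) with
  | none =>
      rw [PySem.List.max?_eq_none_iff] at h
      simp at h
      subst h
      cases hv
  | some m =>
      exact PySem.List.max?_isMax h _ (List.mem_map_of_mem hv)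

-- ===== VERDICT =====
theorem indexOfPrefix_spec : Claim_equal_indexOfPrefix := by
  intro l s _
  unfold Spec_indexOfPrefix indexOfPrefix indexOfPrefix_alt
  have hpw := PySem.List.pairwise_lt_enumerate l 0
  have h0 : PySem.Str.len "" = 0 := by decide
  have hM := maxLen_nonneg l
  have hrange : pvMaxLen l = (((pvMaxLen l).toNat : Nat) : Int) := by omega
  rcases foldA_char s (PySem.List.enumerate l 0) hpw "" (-1) with
    ⟨h1, h2⟩ | ⟨p, hp, hfold, hin, hlt, hbnd, hfst⟩
  · rw [h1, hrange]
    refine (outer_none l s (pvMaxLen l).toNat ?_).symm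
    intro d hd
    apply scan_none
    intro q hq hcontra
    obtain ⟨hqin, hqlen⟩ := hcontra
    have := h2 q hq hqin
    omega
  · rw [hfold, hrange]
    have hD1 : 1 ≤ PySem.Str.len p.2 := by omega
    have hp2mem : p.2 ∈ l := by
      rcases (PySem.List.mem_enumerate_iff l 0 p).mp hp with ⟨k, hk, hpe⟩
      have : p.2 = l[k] := by rw [hpe]
      rw [this]
      exact List.getElem_mem hk
    have hDM : PySem.Str.len p.2 ≤ pvMaxLen l := len_le_maxLen l p.2 hp2mem
    refine (outer_some l s (pvMaxLen l).toNat (PySem.Str.len p.2) p.1 hD1 (by omega) ?_ ?_).symm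
    · intro d hd
      apply scan_none
      intro q hq hcontra
      obtain ⟨hqin, hqlen⟩ := hcontra
      have := hbnd q hq hqin
      omega
    · exact scan_some s (PySem.Str.len p.2) _ hpw p hp hin rfl
        (fun q hq hq1 hq2 => hfst q hq hq1 hq2)
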